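-- pv_equiv track=rewrite | github.com/apto-as/trinitas-agents | scripts/hooks/post-execution/quality_validator.py | _analyze_function_lengths
-- ===== SOURCE A (Python) =====
-- from typing import Dict, List, Tuple, Optional
--
-- def _analyze_function_lengths(content: str) -> List[Tuple[str, int]]:
--     """Analyze function lengths"""
--     functions = []
--     lines = content.split('\n')
--
--     current_function = None
--     function_start = 0
--     indent_level = 0
--
--     for i, line in enumerate(lines):
--         stripped = line.strip()
--         if stripped.startswith('def '):
--             if current_function:
--                 functions.append((current_function, i - function_start))
--             current_function = stripped.split('(')[0].replace('def ', '')
--             function_start = i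
--             indent_level = len(line) - len(line.lstrip())
--         elif current_function and stripped and len(line) - len(line.lstrip()) <= indent_level and not line.startswith(' '):
--             functions.append((current_function, i - function_start))
--             current_function = None
--
--     if current_function:
--         functions.append((current_function, len(lines) - function_start))
--
--     return functions
-- ===== SOURCE B (Python) =====
-- def _analyze_function_lengths(content):
--     """Two-pass: collect def lines first, then scan forward per function for its end."""
--     lines = content.split('\n')
--     starts = [(i, line) for i, line in enumerate(lines) if line.strip().startswith('def ')]
--     functions = []
--     for s, line in starts:
--         name = line.strip().split('(')[0].replace('def ', '')
--         indent = len(line) - len(line.lstrip())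
--         end = len(lines)
--         for k, nxt in enumerate(lines[s + 1:]):
--             st = nxt.strip()
--             if st.startswith('def ') or (st and len(nxt) - len(nxt.lstrip()) <= indent and not nxt.startswith(' ')):
--                 end = s + 1 + k
--                 break
--         if name:
--             functions.append((name, end - s))
--     return functions
-- ===== Notes on version B (the rewrite author's own statement) =====
-- stated objective: alternative
-- what changed: Replaced A's single pass with running state (current function, start index, indent level) by two passes: first collect all def lines with enumerate, then for each def scan forward through the tail slice for its terminating line.
import Mathlib
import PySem

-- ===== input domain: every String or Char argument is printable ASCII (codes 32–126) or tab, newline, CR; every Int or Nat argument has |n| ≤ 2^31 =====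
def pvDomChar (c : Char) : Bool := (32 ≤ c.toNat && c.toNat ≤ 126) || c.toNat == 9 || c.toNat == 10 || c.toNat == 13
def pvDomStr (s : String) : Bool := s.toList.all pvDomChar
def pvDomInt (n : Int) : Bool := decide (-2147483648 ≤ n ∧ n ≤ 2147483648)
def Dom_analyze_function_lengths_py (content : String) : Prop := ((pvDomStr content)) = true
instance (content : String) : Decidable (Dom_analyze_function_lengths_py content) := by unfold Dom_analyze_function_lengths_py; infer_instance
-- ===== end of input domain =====

-- B replaces A's running-state single pass by two passes: first collect the def lines,
-- then scan forward from each def for its end line (objective: alternative decomposition).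

-- shared per-line primitives (the identical expressions appear verbatim in both Pythons)
def pvTruthy : Option String → Bool
  | none => false
  | some s => s ≠ ""

def pvIsDef (l : String) : Bool := PySem.Str.startswith (PySem.Str.strip l) "def "

def pvName (l : String) : String :=
  PySem.Str.replace (((PySem.Str.split? (PySem.Str.strip l) "(").getD []).headD "") "def " ""

def pvIndent (l : String) : Int :=
  PySem.Str.len l - PySem.Str.len (PySem.Str.lstrip l)

-- ===== PORT A =====
-- loop body of A's single for-loop; state = (functions, current_function, function_start, indent_level)
def pvStepA (st : List (String × Int) × Option String × Int × Int) (p : Int × String) :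
    List (String × Int) × Option String × Int × Int :=
  let functions := st.1
  let cur := st.2.1
  let fstart := st.2.2.1
  let ilev := st.2.2.2
  let i := p.1
  let line := p.2
  let stripped := PySem.Str.strip line
  if PySem.Str.startswith stripped "def " then
    ((if pvTruthy cur then functions ++ [(cur.getD "", i - fstart)] else functions),
      some (PySem.Str.replace (((PySem.Str.split? stripped "(").getD []).headD "") "def " ""), i,
      PySem.Str.len line - PySem.Str.len (PySem.Str.lstrip line))
  else if pvTruthy cur && !(stripped == "") &&
      (PySem.Str.len line - PySem.Str.len (PySem.Str.lstrip line) ≤ ilev) &&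
      !(PySem.Str.startswith line " ") then
    (functions ++ [(cur.getD "", i - fstart)], none, fstart, ilev)
  else st

-- the trailing 'if current_function: functions.append(...)'
def pvFinishA (total : Int) (st : List (String × Int) × Option String × Int × Int) :
    List (String × Int) :=
  if pvTruthy st.2.1 then st.1 ++ [(st.2.1.getD "", total - st.2.2.1)] else st.1

def analyze_function_lengths_py (content : String) : List (String × Int) :=
  let lines := (PySem.Str.split? content "\n").getD []
  pvFinishA (lines.length : Int)
    ((PySem.List.enumerate lines).foldl pvStepA ([], none, 0, 0))

-- ===== PORT B =====
-- the stopping predicate of B's inner scan (identical expression to A's two tests)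
def pvTerm (d : Int) (l : String) : Bool :=
  pvIsDef l || (!(PySem.Str.strip l == "") && (pvIndent l ≤ d) && !(PySem.Str.startswith l " "))

-- 'for k, nxt in enumerate(lines[s+1:]): if <term>: end = s+1+k; break' — pos carries s+1+k
def pvFindEnd (d : Int) (pos : Int) : List String → Option Int
  | [] => none
  | nxt :: rest => if pvTerm d nxt then some pos else pvFindEnd d (pos + 1) rest

-- per-def body of B's second pass
def pvStepB (lines : List String) (functions : List (String × Int)) (p : Int × String) :
    List (String × Int) :=
  let s := p.1
  let line := p.2
  let name := pvName line
  let indent := pvIndent line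
  let endIdx := (pvFindEnd indent (s + 1)
      (PySem.List.slice lines (some (s + 1)) none)).getD (lines.length : Int)
  if name ≠ "" then functions ++ [(name, endIdx - s)] else functions

def analyze_function_lengths_py_alt (content : String) : List (String × Int) :=
  let lines := (PySem.Str.split? content "\n").getD []
  let starts := (PySem.List.enumerate lines).filter (fun p => pvIsDef p.2)
  starts.foldl (pvStepB lines) []

-- ===== PRECONDITION & SPEC =====
def Spec_analyze_function_lengths_py (content : String) (out : List (String × Int)) : Prop := out = analyze_function_lengths_py_alt content
instance (content : String) (out : List (String × Int)) : Decidable (Spec_analyze_function_lengths_py content out) := by unfold Spec_analyze_function_lengths_py; infer_instance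

-- ===== CLAIM (what is proved, stated in full; the proofs are below) =====
def Claim_equal_analyze_function_lengths_py : Prop := ∀ (content : String), Dom_analyze_function_lengths_py content → Spec_analyze_function_lengths_py content (analyze_function_lengths_py content)

-- ===== LEMMAS AND PROOFS =====

-- number of lines before the first terminator (tail.length if none)
def pvScanLen (d : Int) : List String → Nat
  | [] => 0
  | l :: ls => if pvTerm d l then 0 else 1 + pvScanLen d ls

-- index-free common description of the output
def pvEmit : List String → List (String × Int)
  | [] => []
  | l :: ls =>
    (if pvIsDef l then
       (if pvName l ≠ "" then [(pvName l, ((1 + pvScanLen (pvIndent l) ls : Nat) : Int))] else [])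
     else []) ++ pvEmit ls

lemma pvFindEnd_getD (d : Int) (tail : List String) : ∀ pos : Int,
    (pvFindEnd d pos tail).getD (pos + tail.length) = pos + (pvScanLen d tail : Int) := by
  induction tail with
  | nil => intro pos; simp [pvFindEnd, pvScanLen]
  | cons l ls ih =>
    intro pos
    by_cases h : pvTerm d l
    · simp [pvFindEnd, pvScanLen, h]
    · have := ih (pos + 1)
      simp only [pvFindEnd, pvScanLen, h]
      simp only [List.length_cons] at *
      push_cast at *
      rw [show pos + ((ls.length : Int) + 1) = (pos + 1) + ls.length by ring, this]
      ring

lemma pvB_emit (rest : List String) : ∀ (pre : List String) (acc : List (String × Int)),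
    ((PySem.List.enumerate rest (pre.length : Int)).filter (fun p => pvIsDef p.2)).foldl
      (pvStepB (pre ++ rest)) acc = acc ++ pvEmit rest := by
  induction rest with
  | nil => intro pre acc; simp [PySem.List.enumerate_nil, pvEmit]
  | cons l ls ih =>
    intro pre acc
    have hcast : (pre.length : Int) + 1 = ((pre ++ [l]).length : Int) := by simp
    have happ : (pre ++ [l]) ++ ls = pre ++ l :: ls := by simp
    rw [PySem.List.enumerate_cons]
    by_cases hd : pvIsDef l
    · have hdrop : PySem.List.slice (pre ++ l :: ls) (some ((pre.length : Int) + 1)) none = ls := by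
        rw [hcast, PySem.List.slice_from_natCast]
        rw [← happ]
        exact List.drop_left
      have hlen : ((pre ++ l :: ls).length : Int) = ((pre.length : Int) + 1) + (ls.length : Int) := by
        simp; ring
      have hstep : pvStepB (pre ++ l :: ls) acc ((pre.length : Int), l)
          = acc ++ (if pvName l ≠ "" then
              [(pvName l, ((1 + pvScanLen (pvIndent l) ls : Nat) : Int))] else []) := by
        simp only [pvStepB, hdrop, hlen, pvFindEnd_getD]
        by_cases hn : pvName l = "" <;> simp [hn] <;> ring
      rw [List.filter_cons_of_pos (by simpa using hd), List.foldl_cons, hstep]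
      rw [hcast, ← happ, ih (pre ++ [l])]
      simp [pvEmit, hd]
    · rw [List.filter_cons_of_neg (by simpa using hd)]
      rw [hcast, ← happ, ih (pre ++ [l])]
      simp [pvEmit, hd]

lemma pvA_emit (rest : List String) : ∀ (i st il : Int) (acc : List (String × Int)),
    (∀ cur : Option String, pvTruthy cur = false →
      pvFinishA (i + rest.length) ((PySem.List.enumerate rest i).foldl pvStepA (acc, cur, st, il)) =
        acc ++ pvEmit rest) ∧
    (∀ n : String, n ≠ "" →
      pvFinishA (i + rest.length) ((PySem.List.enumerate rest i).foldl pvStepA (acc, some n, st, il)) =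
        acc ++ (n, i + (pvScanLen il rest : Int) - st) :: pvEmit rest) := by
  induction rest with
  | nil =>
    intro i st il acc
    constructor
    · intro cur hcur; simp [PySem.List.enumerate_nil, pvFinishA, hcur, pvEmit]
    · intro n hn; simp [PySem.List.enumerate_nil, pvFinishA, pvTruthy, pvScanLen, hn, pvEmit]
  | cons l ls ih =>
    intro i st il acc
    have htot : i + ((l :: ls).length : Int) = (i + 1) + (ls.length : Int) := by push_cast [List.length_cons]; ring
    constructor
    · intro cur hcur
      rw [PySem.List.enumerate_cons, List.foldl_cons, htot]
      by_cases hd : pvIsDef l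
      · have hstep : pvStepA (acc, cur, st, il) (i, l)
            = (acc, some (pvName l), i, pvIndent l) := by
          simp only [pvStepA, pvName, pvIndent]
          simp [pvIsDef] at hd
          simp [hd, hcur]
        rw [hstep]
        by_cases hn : pvName l = ""
        · rw [(ih (i + 1) i (pvIndent l) acc).1 (some (pvName l)) (by simp [pvTruthy, hn])]
          simp [pvEmit, hd, hn]
        · rw [(ih (i + 1) i (pvIndent l) acc).2 (pvName l) hn]
          have : (i + 1) + (pvScanLen (pvIndent l) ls : Int) - i
              = ((1 + pvScanLen (pvIndent l) ls : Nat) : Int) := by push_cast; ring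
          simp [pvEmit, hd, hn, this]
      · have hstep : pvStepA (acc, cur, st, il) (i, l) = (acc, cur, st, il) := by
          simp only [pvStepA]
          simp [pvIsDef] at hd
          simp [hd, hcur]
        rw [hstep, (ih (i + 1) st il acc).1 cur hcur]
        simp [pvEmit, hd]
    · intro n hn
      rw [PySem.List.enumerate_cons, List.foldl_cons, htot]
      have htr : pvTruthy (some n) = true := by simp [pvTruthy, hn]
      by_cases hd : pvIsDef l
      · have hterm : pvTerm il l = true := by simp [pvTerm, hd]
        have hstep : pvStepA (acc, some n, st, il) (i, l)
            = (acc ++ [(n, i - st)], some (pvName l), i, pvIndent l) := by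
          simp only [pvStepA, pvName, pvIndent]
          simp [pvIsDef] at hd
          simp [hd, htr]
        rw [hstep]
        by_cases hnm : pvName l = ""
        · rw [(ih (i + 1) i (pvIndent l) (acc ++ [(n, i - st)])).1 (some (pvName l))
            (by simp [pvTruthy, hnm])]
          simp [pvEmit, pvScanLen, hd, hnm, hterm]
        · rw [(ih (i + 1) i (pvIndent l) (acc ++ [(n, i - st)])).2 (pvName l) hnm]
          have : (i + 1) + (pvScanLen (pvIndent l) ls : Int) - i
              = ((1 + pvScanLen (pvIndent l) ls : Nat) : Int) := by push_cast; ring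
          simp [pvEmit, pvScanLen, hd, hnm, hterm, this]
      · have hd' : pvIsDef l = false := by rwa [Bool.not_eq_true] at hd
        have hcond : (pvTruthy (some n) && !(PySem.Str.strip l == "") &&
            decide (PySem.Str.len l - PySem.Str.len (PySem.Str.lstrip l) ≤ il) &&
            !(PySem.Str.startswith l " ")) = pvTerm il l := by
          simp only [pvTerm, pvIndent, hd', Bool.false_or, htr, Bool.true_and]
          rfl
        by_cases ht : pvTerm il l
        · have hstep : pvStepA (acc, some n, st, il) (i, l)
              = (acc ++ [(n, i - st)], none, st, il) := by
            simp only [pvStepA]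
            rw [show (PySem.Str.startswith (PySem.Str.strip l) "def ") = pvIsDef l from rfl,
              hd', hcond, ht]
            simp
          rw [hstep, (ih (i + 1) st il (acc ++ [(n, i - st)])).1 none rfl]
          simp [pvEmit, pvScanLen, hd, ht]
        · have ht' : pvTerm il l = false := by rwa [Bool.not_eq_true] at ht
          have hstep : pvStepA (acc, some n, st, il) (i, l) = (acc, some n, st, il) := by
            simp only [pvStepA]
            rw [show (PySem.Str.startswith (PySem.Str.strip l) "def ") = pvIsDef l from rfl,
              hd', hcond, ht']
            simp
          rw [hstep, (ih (i + 1) st il acc).2 n hn]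
          have : (i + 1) + (pvScanLen il ls : Int) - st
              = i + ((pvScanLen il (l :: ls) : Nat) : Int) - st := by
            simp [pvScanLen, ht]; ring
          simp only [this]
          simp [pvEmit, hd]

-- ===== VERDICT (by name: the statement is the Claim_ definition above) =====
theorem analyze_function_lengths_py_spec : Claim_equal_analyze_function_lengths_py := by
  unfold Claim_equal_analyze_function_lengths_py
  intro content _
  unfold Spec_analyze_function_lengths_py
  unfold analyze_function_lengths_py analyze_function_lengths_py_alt
  set lines := (PySem.Str.split? content "\n").getD [] with hl
  have hA := (pvA_emit lines 0 0 0 []).1 none rfl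
  have hB := pvB_emit lines [] []
  simp only [List.length_nil, Nat.cast_zero, List.nil_append, zero_add] at hA hB
  simp only [hA, hB]
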